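-- pv_equiv track=rewrite | github.com/ZYZhang2016/think--Python | chapter09/Exercise9.6.py | is_abecedarian1
-- ===== SOURCE A (Python) =====
-- def is_abecedarian1(word):
-- 	'''如果单词中的字母按照字母顺序出现，则返回True
-- 	   #使用for循环
--
-- 	:param word:单词
-- 	:return: 布尔值
-- 	'''
-- 	word.lower()
-- 	letter_curt = word[0]
-- 	for letter in word:
-- 		if letter < letter_curt:
-- 			return False
-- 		letter_curt = letter
-- 	return True
-- ===== SOURCE B (Python) =====
-- def is_abecedarian1(word):
--     return sorted(word) == list(word)
-- ===== Notes on version B (the rewrite author's own statement) =====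
-- stated objective: simpler
-- what changed: Replaces the explicit adjacency scan with a single sort-then-compare: the word is abecedarian iff it equals its sorted form.
import Mathlib
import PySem

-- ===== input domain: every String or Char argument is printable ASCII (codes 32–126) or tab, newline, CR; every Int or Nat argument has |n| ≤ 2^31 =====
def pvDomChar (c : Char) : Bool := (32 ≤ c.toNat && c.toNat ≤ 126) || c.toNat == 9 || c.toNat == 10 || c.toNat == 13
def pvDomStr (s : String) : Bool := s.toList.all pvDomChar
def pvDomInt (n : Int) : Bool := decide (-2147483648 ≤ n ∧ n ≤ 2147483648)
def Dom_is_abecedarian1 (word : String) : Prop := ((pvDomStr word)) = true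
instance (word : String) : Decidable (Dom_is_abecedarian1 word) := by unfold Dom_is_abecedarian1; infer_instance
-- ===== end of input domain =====

-- B decides abecedarian-ness by comparing the word with its sorted form (simpler, one comparison
-- against sorted(word)) instead of A's adjacency scan with an explicit current-letter variable.

-- ===== PORT A =====
-- the for-loop of A: early return False when letter < letter_curt, else carry letter as new curt
def isAbecedarian1Loop : List Char → Char → Bool
  | [], _ => true
  | letter :: rest, curt => if letter < curt then false else isAbecedarian1Loop rest letter

def is_abecedarian1 (word : String) : Bool :=
  -- word.lower() in A is computed and discarded; letter_curt = word[0] raises IndexError on ""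
  match PySem.Str.pyGet? word 0 with
  | none => false          -- IndexError in Python; excluded by Pre_
  | some c0 => isAbecedarian1Loop word.toList c0

-- ===== PORT B =====
def is_abecedarian1_alt (word : String) : Bool :=
  PySem.List.sorted word.toList (fun x => x) false == word.toList

-- ===== PRECONDITION & SPEC =====
-- Pre_ excludes only the empty string, on which A raises IndexError at word[0] (B would return True there).
def Pre_is_abecedarian1 (word : String) : Prop := word ≠ ""
instance (word : String) : Decidable (Pre_is_abecedarian1 word) := by unfold Pre_is_abecedarian1; infer_instance
def pvWitness_is_abecedarian1 : String := "abc"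

def Spec_is_abecedarian1 (word : String) (out : Bool) : Prop := out = is_abecedarian1_alt word
instance (word : String) (out : Bool) : Decidable (Spec_is_abecedarian1 word out) := by unfold Spec_is_abecedarian1; infer_instance

-- ===== CLAIM (what is proved, stated in full; the proofs are below) =====
def Claim_equal_is_abecedarian1 : Prop := ∀ (word : String), Dom_is_abecedarian1 word → Pre_is_abecedarian1 word → Spec_is_abecedarian1 word (is_abecedarian1 word)

-- ===== LEMMAS AND PROOFS =====
-- A's loop decides the chain condition "curt ≤ first element ≤ next ≤ …"
theorem isAbecedarian1Loop_eq_chain (l : List Char) (curt : Char) :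
    isAbecedarian1Loop l curt = decide (List.IsChain (· ≤ ·) (curt :: l)) := by
  induction l generalizing curt with
  | nil => simp [isAbecedarian1Loop]
  | cons c rest ih =>
      simp only [isAbecedarian1Loop, List.isChain_cons_cons, ih]
      by_cases h : c < curt
      · simp [h, not_le.mpr h]
      · simp [h, not_lt.mp h]

-- B's comparison decides pairwise-sortedness of the character list
theorem alt_eq_pairwise (word : String) :
    is_abecedarian1_alt word = decide (word.toList.Pairwise (· ≤ ·)) := by
  unfold is_abecedarian1_alt
  by_cases h : word.toList.Pairwise (· ≤ ·)
  · simp [h, PySem.List.sorted_eq_self_of_pairwise word.toList (fun x => x) h]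
  · simp only [h, decide_false, beq_eq_false_iff_ne, ne_eq]
    intro he
    exact h (he ▸ PySem.List.sorted_pairwise word.toList (fun x => x))

-- ===== VERDICT (by name: the statement is the Claim_ definition above) =====
theorem is_abecedarian1_spec : Claim_equal_is_abecedarian1 := by
  intro word _ hpre
  unfold Spec_is_abecedarian1 is_abecedarian1
  have hne : word.toList ≠ [] := by
    intro h
    exact hpre (by rwa [← String.toList_eq_nil_iff] )
  obtain ⟨c0, rest, hl⟩ := List.exists_cons_of_ne_nil hne
  have hget : PySem.Str.pyGet? word 0 = some c0 := by
    simp [PySem.Str.pyGet?, PySem.List.pyGet?, PySem.List.pyIdx?, hl]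
  rw [hget]
  show isAbecedarian1Loop word.toList c0 = _
  rw [alt_eq_pairwise, isAbecedarian1Loop_eq_chain, hl]
  simp only [decide_eq_decide, List.isChain_iff_pairwise, List.pairwise_cons]
  constructor
  · rintro ⟨_, h⟩; exact h
  · intro h
    refine ⟨?_, h⟩
    intro a ha
    rcases List.mem_cons.mp ha with rfl | ha'
    · exact le_refl _
    · exact h.1 a ha'
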